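-- pv_equiv track=rewrite | github.com/RussGuo/Advisor-Memory | scripts/consult_advisor_memory.py | extract_timeline_entries
-- ===== SOURCE A (Python) =====
-- def extract_timeline_entries(timeline: str, limit: int = 3) -> list[str]:
--     entries = []
--     current: list[str] = []
--     for line in timeline.splitlines():
--         if line.startswith("- **"):
--             if current:
--                 entries.append("\n".join(current).strip())
--                 current = []
--             current.append(line)
--             continue
--         if current:
--             current.append(line)
--     if current:
--         entries.append("\n".join(current).strip())
--     return [entry for entry in entries[:limit] if entry]
-- ===== SOURCE B (Python) =====
-- def extract_timeline_entries(timeline: str, limit: int = 3) -> list[str]: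
--     lines = timeline.splitlines()
--
--     def blocks_from(start: int) -> list[str]:
--         if start >= len(lines):
--             return []
--         j = start + 1
--         while j < len(lines) and not lines[j].startswith("- **"):
--             j += 1
--         return ["\n".join(lines[start:j]).strip()] + blocks_from(j)
--
--     first = 0
--     while first < len(lines) and not lines[first].startswith("- **"):
--         first += 1
--     blocks = blocks_from(first)
--     return [b for b in blocks[:limit] if b]
-- ===== Notes on version B (the rewrite author's own statement) =====
-- stated objective: alternative
-- what changed: Replaced A's single pass with a running line buffer that is flushed at each marker by a recursive decomposition: find the first marker line, then recursively cut the line list at each next marker into slices, joining each slice into a block; slice and filter at the end as before.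
import Mathlib
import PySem

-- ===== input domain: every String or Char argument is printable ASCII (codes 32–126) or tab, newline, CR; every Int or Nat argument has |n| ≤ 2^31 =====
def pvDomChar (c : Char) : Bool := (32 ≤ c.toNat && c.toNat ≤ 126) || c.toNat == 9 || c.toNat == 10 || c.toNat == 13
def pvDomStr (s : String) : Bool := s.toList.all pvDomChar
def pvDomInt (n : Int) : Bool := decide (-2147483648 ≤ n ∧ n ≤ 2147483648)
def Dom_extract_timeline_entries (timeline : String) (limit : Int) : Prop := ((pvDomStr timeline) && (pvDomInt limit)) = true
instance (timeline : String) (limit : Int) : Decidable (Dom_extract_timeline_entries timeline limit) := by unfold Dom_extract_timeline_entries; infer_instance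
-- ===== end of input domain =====

-- B replaces A's single pass with a flush-on-marker buffer by a recursive cut-at-marker
-- decomposition over the line list (objective: alternative; same cost).

-- ===== PORT A =====
-- line.startswith("- **")  (shared predicate of both sources)
def pvMarker (l : String) : Bool := PySem.Str.startswith l "- **"

-- A's tail: 'if current: entries.append(...)' after the loop, applied to (entries, current)
def pvFlushA (p : List String × List String) : List String :=
  if p.2.isEmpty then p.1 else p.1 ++ [PySem.Str.strip (PySem.Str.join "\n" p.2)]

-- the body of A's for-loop, acting on the state (entries, current)
def pvStep (p : List String × List String) (line : String) : List String × List String :=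
  if pvMarker line then
    if p.2.isEmpty then (p.1, [line])
    else (p.1 ++ [PySem.Str.strip (PySem.Str.join "\n" p.2)], [line])
  else
    if p.2.isEmpty then p
    else (p.1, p.2 ++ [line])

def extract_timeline_entries (timeline : String) (limit : Int) : List String :=
  (PySem.List.slice
    (pvFlushA ((PySem.Str.splitlines timeline).foldl pvStep ([], [])))
    none (some limit)).filter (fun e => !(e == ""))

-- ===== PORT B =====
-- Source B's blocks(ls): head is a marker line; the inner while collects the prefix of
-- non-marker lines (takeWhile) and leaves the rest (dropWhile), then recurse.
def pvBlocks : List String → List String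
  | [] => []
  | h :: rest =>
    PySem.Str.strip (PySem.Str.join "\n" (h :: rest.takeWhile (fun x => !pvMarker x)))
      :: pvBlocks (rest.dropWhile (fun x => !pvMarker x))
termination_by ls => ls.length
decreasing_by simpa using Nat.lt_succ_of_le (List.length_dropWhile_le _ _)

-- the outer while (drop pre-first-marker lines) is the dropWhile below
def extract_timeline_entries_alt (timeline : String) (limit : Int) : List String :=
  (PySem.List.slice
    (pvBlocks ((PySem.Str.splitlines timeline).dropWhile (fun x => !pvMarker x)))
    none (some limit)).filter (fun b => !(b == ""))

-- ===== PRECONDITION & SPEC =====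
def Spec_extract_timeline_entries (timeline : String) (limit : Int) (out : List String) : Prop := out = extract_timeline_entries_alt timeline limit
instance (timeline : String) (limit : Int) (out : List String) : Decidable (Spec_extract_timeline_entries timeline limit out) := by unfold Spec_extract_timeline_entries; infer_instance

-- ===== CLAIM (what is proved, stated in full; the proofs are below) =====
def Claim_equal_extract_timeline_entries : Prop := ∀ (timeline : String) (limit : Int), Dom_extract_timeline_entries timeline limit → Spec_extract_timeline_entries timeline limit (extract_timeline_entries timeline limit)

-- ===== LEMMAS AND PROOFS =====
theorem pvBlocks_cons (h : String) (rest : List String) :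
    pvBlocks (h :: rest)
      = PySem.Str.strip (PySem.Str.join "\n" (h :: rest.takeWhile (fun x => !pvMarker x)))
          :: pvBlocks (rest.dropWhile (fun x => !pvMarker x)) := by
  rw [pvBlocks.eq_def]

theorem pvLoop_eq_cons : ∀ (ls : List String) (e c : List String), c ≠ [] →
    pvFlushA (ls.foldl pvStep (e, c))
      = e ++ PySem.Str.strip (PySem.Str.join "\n" (c ++ ls.takeWhile (fun x => !pvMarker x)))
          :: pvBlocks (ls.dropWhile (fun x => !pvMarker x)) := by
  intro ls
  induction ls with
  | nil =>
    intro e c hc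
    simp [pvFlushA, pvBlocks, List.isEmpty_iff, hc]
  | cons l ls ih =>
    intro e c hc
    by_cases hm : pvMarker l = true
    · have hstep : pvStep (e, c) l
          = (e ++ [PySem.Str.strip (PySem.Str.join "\n" c)], [l]) := by
        simp [pvStep, hm, List.isEmpty_iff, hc]
      rw [List.foldl_cons, hstep, ih _ [l] (by simp)]
      simp [hm, pvBlocks_cons]
    · have hstep : pvStep (e, c) l = (e, c ++ [l]) := by
        simp [pvStep, hm, List.isEmpty_iff, hc]
      rw [List.foldl_cons, hstep, ih _ (c ++ [l]) (by simp)]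
      simp [hm]

theorem pvLoop_eq_nil : ∀ (ls : List String) (e : List String),
    pvFlushA (ls.foldl pvStep (e, []))
      = e ++ pvBlocks (ls.dropWhile (fun x => !pvMarker x)) := by
  intro ls
  induction ls with
  | nil => intro e; simp [pvFlushA, pvBlocks]
  | cons l ls ih =>
    intro e
    by_cases hm : pvMarker l = true
    · have hstep : pvStep (e, ([] : List String)) l = (e, [l]) := by
        simp [pvStep, hm]
      rw [List.foldl_cons, hstep, pvLoop_eq_cons ls e [l] (by simp)]
      rw [List.dropWhile_cons_of_neg (by simp [hm]), pvBlocks_cons]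
      simp
    · have hstep : pvStep (e, ([] : List String)) l = (e, []) := by
        simp [pvStep, hm]
      rw [List.foldl_cons, hstep, ih e]
      simp [hm]

-- ===== VERDICT (by name: the statement is the Claim_ definition above) =====
theorem extract_timeline_entries_spec : Claim_equal_extract_timeline_entries := by
  intro timeline limit _
  show _ = _
  unfold extract_timeline_entries extract_timeline_entries_alt
  rw [show pvFlushA ((PySem.Str.splitlines timeline).foldl pvStep ([], []))
        = pvBlocks ((PySem.Str.splitlines timeline).dropWhile (fun x => !pvMarker x)) by
      simpa using pvLoop_eq_nil (PySem.Str.splitlines timeline) []]
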